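-- pv_equiv track=rewrite | github.com/yxliao95/structured_reporting | src/common_utils/nlp_utils.py | resolveTokenIndices_byPosition
-- ===== SOURCE A (Python) =====
-- def resolveTokenIndices_byPosition(tokenOffset_base, startPos, length) -> list:
--     """ For example: ".h.s." = "." (offset=0) + "h.s." (offset=1)
--     Tok_to_be_aligned: ".h"  => tokenOffset: [0,1], startPos: 0, length: 2 -> return: [0,1]
--     Tok_to_be_aligned: ".s." => tokenOffset: [0,1], startPos: 2, length: 3 -> return: [1]
--     """
--     indicesList = []
--     doInsert = False
--     posPointer = startPos
--     for i, currPos in enumerate(tokenOffset_base):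
--         nextPos = tokenOffset_base[i + 1] if i + 1 < len(tokenOffset_base) else tokenOffset_base[i] + 99
--         if not doInsert and posPointer >= currPos and posPointer < nextPos:
--             doInsert = True
--             posPointer = startPos + length - 1
--         elif doInsert and posPointer < currPos:
--             break  # break the loop in advance, othewise will stop when finish the loop.
--         if doInsert:
--             indicesList.append(i)
--     return indicesList
-- ===== SOURCE B (Python) =====
-- def resolveTokenIndices_byPosition(tokenOffset_base, startPos, length) -> list:
--     # Two-phase search: locate the token interval containing startPos, then the
--     # first later offset past the span end; result is the contiguous index range.
--     n = len(tokenOffset_base)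
--     start = None
--     for i in range(n):
--         nxt = tokenOffset_base[i + 1] if i + 1 < n else tokenOffset_base[i] + 99
--         if tokenOffset_base[i] <= startPos < nxt:
--             start = i
--             break
--     if start is None:
--         return []
--     endPos = startPos + length - 1
--     stop = n
--     for j in range(start + 1, n):
--         if tokenOffset_base[j] > endPos:
--             stop = j
--             break
--     return list(range(start, stop))
-- ===== Notes on version B (the rewrite author's own statement) =====
-- stated objective: alternative
-- what changed: A's single stateful scan (doInsert flag, moving posPointer, appended accumulator) is replaced by two independent linear searches -- find the interval containing startPos, then the first offset past the span end -- and the result is emitted directly as the contiguous index range list(range(start, stop)).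
import Mathlib
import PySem

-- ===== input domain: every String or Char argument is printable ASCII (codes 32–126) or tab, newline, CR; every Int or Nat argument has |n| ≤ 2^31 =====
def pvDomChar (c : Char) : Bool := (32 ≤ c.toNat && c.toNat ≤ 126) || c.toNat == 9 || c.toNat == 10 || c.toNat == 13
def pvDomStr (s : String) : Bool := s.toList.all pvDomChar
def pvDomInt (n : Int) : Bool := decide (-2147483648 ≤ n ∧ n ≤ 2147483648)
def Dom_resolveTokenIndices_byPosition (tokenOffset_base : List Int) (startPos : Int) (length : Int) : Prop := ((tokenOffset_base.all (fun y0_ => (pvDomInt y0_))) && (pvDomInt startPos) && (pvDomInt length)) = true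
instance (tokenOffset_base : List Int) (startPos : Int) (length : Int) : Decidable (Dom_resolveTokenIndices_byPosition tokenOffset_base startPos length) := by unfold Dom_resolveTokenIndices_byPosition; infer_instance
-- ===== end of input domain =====

-- B replaces A's single stateful scan (insert-flag + moving pointer + append accumulator)
-- by two independent searches (start interval, first offset past the span end) and returns
-- the contiguous index range directly; same cost, plainer structure (objective: alternative).

-- ===== PORT A =====
-- A's for-loop with state (indicesList, doInsert, posPointer) and early break.
-- `fuel` (passed as off.length) is only a structural totality guard: the loop runs
-- while i < off.length, exactly as Python's `for i, currPos in enumerate(...)`.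
-- Indexing uses `!` (panic-free here: every access is guarded by the bound check).
def pvALoop (off : List Int) (startPos length : Int) : Nat → Nat → Bool → Int → List Int → List Int
  | 0, _, _, _, acc => acc
  | fuel + 1, i, doInsert, posPointer, acc =>
    if i < off.length then
      let currPos := off[i]!
      let nextPos := if i + 1 < off.length then off[i + 1]! else off[i]! + 99
      if doInsert = false ∧ posPointer ≥ currPos ∧ posPointer < nextPos then
        -- doInsert := True; posPointer := startPos + length - 1; then `if doInsert: append i`
        pvALoop off startPos length fuel (i + 1) true (startPos + length - 1) (acc ++ [(i : Int)])
      else if doInsert = true ∧ posPointer < currPos then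
        acc  -- break
      else if doInsert = true then
        pvALoop off startPos length fuel (i + 1) doInsert posPointer (acc ++ [(i : Int)])
      else
        pvALoop off startPos length fuel (i + 1) doInsert posPointer acc
    else acc

def resolveTokenIndices_byPosition (tokenOffset_base : List Int) (startPos : Int) (length : Int) : List Int :=
  pvALoop tokenOffset_base startPos length tokenOffset_base.length 0 false startPos []

-- ===== PORT B =====
-- first loop of Source B: the index of the interval [off[i], next_i) containing startPos
-- (fuel = off.length is a structural totality guard; the scan itself is i < off.length)
def pvFindStart (off : List Int) (startPos : Int) : Nat → Nat → Option Nat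
  | 0, _ => none
  | fuel + 1, i =>
    if i < off.length then
      let nxt := if i + 1 < off.length then off[i + 1]! else off[i]! + 99
      if off[i]! ≤ startPos ∧ startPos < nxt then some i
      else pvFindStart off startPos fuel (i + 1)
    else none

-- second loop of Source B: first j ≥ start+1 with off[j] > endPos, else len(off)
def pvFindStop (off : List Int) (endPos : Int) : Nat → Nat → Nat
  | 0, _ => off.length
  | fuel + 1, j =>
    if j < off.length then
      if off[j]! > endPos then j else pvFindStop off endPos fuel (j + 1)
    else off.length

def resolveTokenIndices_byPosition_alt (tokenOffset_base : List Int) (startPos : Int) (length : Int) : List Int :=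
  match pvFindStart tokenOffset_base startPos tokenOffset_base.length 0 with
  | none => []
  | some start =>
      -- endPos = startPos + length - 1; stop = pvFindStop …; list(range(start, stop))
      PySem.List.pyRange (start : Int)
        ((pvFindStop tokenOffset_base (startPos + length - 1) tokenOffset_base.length (start + 1) : Nat) : Int) 1

-- ===== PRECONDITION & SPEC =====
def Spec_resolveTokenIndices_byPosition (tokenOffset_base : List Int) (startPos : Int) (length : Int) (out : List Int) : Prop := out = resolveTokenIndices_byPosition_alt tokenOffset_base startPos length
instance (tokenOffset_base : List Int) (startPos : Int) (length : Int) (out : List Int) : Decidable (Spec_resolveTokenIndices_byPosition tokenOffset_base startPos length out) := by unfold Spec_resolveTokenIndices_byPosition; infer_instance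

-- ===== CLAIM (what is proved, stated in full; the proofs are below) =====
def Claim_equal_resolveTokenIndices_byPosition : Prop := ∀ (tokenOffset_base : List Int) (startPos : Int) (length : Int), Dom_resolveTokenIndices_byPosition tokenOffset_base startPos length → Spec_resolveTokenIndices_byPosition tokenOffset_base startPos length (resolveTokenIndices_byPosition tokenOffset_base startPos length)

-- ===== LEMMAS AND PROOFS =====

-- A's accumulator only grows at the back: it factors out.
theorem pvALoop_acc (fuel : Nat) : ∀ (off : List Int) (s l : Int) (i : Nat) (d : Bool) (p : Int)
    (acc : List Int), pvALoop off s l fuel i d p acc = acc ++ pvALoop off s l fuel i d p [] := by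
  induction fuel with
  | zero =>
      intro off s l i d p acc
      simp [pvALoop]
  | succ n ih =>
      intro off s l i d p acc
      rw [pvALoop]; conv_rhs => rw [pvALoop]
      by_cases hi : i < off.length
      · simp only [hi, if_pos]
        generalize (if i + 1 < off.length then off[i + 1]! else off[i]! + 99) = nxt
        split_ifs with h1 h2 h3
        · conv_lhs => rw [ih off s l (i + 1) true (s + l - 1) (acc ++ [(i : Int)])]
          conv_rhs => rw [ih off s l (i + 1) true (s + l - 1) ([] ++ [(i : Int)])]
          simp
        · simp
        · conv_lhs => rw [ih off s l (i + 1) d p (acc ++ [(i : Int)])]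
          conv_rhs => rw [ih off s l (i + 1) d p ([] ++ [(i : Int)])]
          simp
        · conv_lhs => rw [ih off s l (i + 1) d p acc]
      · simp [hi]

theorem le_pvFindStop (fuel : Nat) : ∀ (off : List Int) (p : Int) (j : Nat),
    j ≤ off.length → j ≤ pvFindStop off p fuel j := by
  induction fuel with
  | zero =>
      intro off p j hle
      simpa [pvFindStop] using hle
  | succ n ih =>
      intro off p j hle
      rw [pvFindStop]
      by_cases hj : j < off.length
      · simp only [hj, if_pos]
        split_ifs with h1
        · exact Nat.le_refl j
        · have := ih off p (j + 1) (by omega)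
          omega
      · simp [hj]
        omega

-- with enough fuel on both sides, the stop search does not depend on the fuel
theorem pvFindStop_fuel (f1 : Nat) : ∀ (f2 : Nat) (off : List Int) (p : Int) (j : Nat),
    off.length ≤ j + f1 → off.length ≤ j + f2 →
    pvFindStop off p f1 j = pvFindStop off p f2 j := by
  induction f1 with
  | zero =>
      intro f2 off p j h1 h2
      cases f2 with
      | zero => rfl
      | succ m =>
          have hj : ¬ j < off.length := by omega
          simp [pvFindStop, hj]
  | succ n ih =>
      intro f2 off p j h1 h2
      cases f2 with
      | zero =>
          have hj : ¬ j < off.length := by omega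
          simp [pvFindStop, hj]
      | succ m =>
          rw [pvFindStop]; conv_rhs => rw [pvFindStop]
          by_cases hj : j < off.length
          · simp only [hj, if_pos]
            split_ifs with h1'
            · rfl
            · exact ih m off p (j + 1) (by omega) (by omega)
          · simp [hj]

theorem pvFindStart_lt (fuel : Nat) : ∀ (off : List Int) (s : Int) (i i0 : Nat),
    pvFindStart off s fuel i = some i0 → i0 < off.length := by
  induction fuel with
  | zero =>
      intro off s i i0 hEq
      simp [pvFindStart] at hEq
  | succ n ih =>
      intro off s i i0 hEq
      rw [pvFindStart] at hEq
      by_cases hi : i < off.length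
      · simp only [hi, if_pos] at hEq
        split_ifs at hEq
        all_goals first
          | exact (Option.some.inj hEq) ▸ hi
          | exact ih off s (i + 1) i0 hEq
      · simp [hi] at hEq

-- peeling one element off a contiguous Int-valued index range
theorem map_range_cons (j stop : Nat) (h : j < stop) :
    List.map (fun k : Nat => ((j : Int) + (k : Int))) (List.range (stop - j)) =
      (j : Int) :: List.map (fun k : Nat => (((j + 1 : Nat) : Int) + (k : Int))) (List.range (stop - (j + 1))) := by
  have hs : stop - j = (stop - (j + 1)) + 1 := by omega
  rw [hs, List.range_succ_eq_map, List.map_cons, List.map_map]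
  refine List.cons_eq_cons.mpr ⟨by simp, ?_⟩
  apply List.map_congr_left
  intro a ha
  simp only [Function.comp_apply]
  push_cast
  ring

-- After doInsert is set with pointer p, A collects exactly [j, …, pvFindStop p j − 1].
theorem pvALoop_phase2 (fuel : Nat) : ∀ (off : List Int) (s l p : Int) (j : Nat),
    off.length ≤ j + fuel →
    pvALoop off s l fuel j true p [] =
      List.map (fun k : Nat => ((j : Int) + (k : Int))) (List.range (pvFindStop off p fuel j - j)) := by
  induction fuel with
  | zero =>
      intro off s l p j h
      have hz : off.length - j = 0 := by omega
      simp [pvALoop, pvFindStop, hz]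
  | succ n ih =>
      intro off s l p j h
      rw [pvALoop, pvFindStop]
      by_cases hj : j < off.length
      · simp only [hj, if_pos]
        generalize (if j + 1 < off.length then off[j + 1]! else off[j]! + 99) = nxt
        simp only [Bool.true_eq_false, false_and, if_false, true_and, gt_iff_lt]
        by_cases hbr : p < off[j]!
        · rw [if_pos hbr, if_pos hbr]
          simp
        · rw [if_neg hbr, if_neg hbr]
          simp only [List.nil_append]
          rw [pvALoop_acc n off s l (j + 1) true p [(j : Int)]]
          rw [ih off s l p (j + 1) (by omega)]
          have hle : j + 1 ≤ pvFindStop off p n (j + 1) :=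
            le_pvFindStop n off p (j + 1) (by omega)
          rw [map_range_cons j (pvFindStop off p n (j + 1)) (by omega)]
          simp
      · have hz : off.length - j = 0 := by omega
        simp [hj, hz]

-- Before doInsert is set, A scans exactly like Source B's start search; once it finds the
-- start it collects exactly Source B's range.
theorem pvALoop_phase1 (fuel : Nat) : ∀ (off : List Int) (s l : Int) (i : Nat),
    off.length ≤ i + fuel →
    pvALoop off s l fuel i false s [] =
      (match pvFindStart off s fuel i with
       | none => []
       | some i0 => (i0 : Int) :: List.map (fun k : Nat => (((i0 + 1 : Nat) : Int) + (k : Int)))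
           (List.range (pvFindStop off (s + l - 1) off.length (i0 + 1) - (i0 + 1)))) := by
  induction fuel with
  | zero =>
      intro off s l i h
      simp [pvALoop, pvFindStart]
  | succ n ih =>
      intro off s l i h
      rw [pvALoop, pvFindStart]
      by_cases hi : i < off.length
      · simp only [hi, if_pos]
        generalize (if i + 1 < off.length then off[i + 1]! else off[i]! + 99) = nxt
        simp only [Bool.false_eq_true, false_and, if_false, true_and, ge_iff_le]
        by_cases hc : off[i]! ≤ s ∧ s < nxt
        · rw [if_pos hc, if_pos hc]
          simp only [List.nil_append]
          rw [pvALoop_acc n off s l (i + 1) true (s + l - 1) [(i : Int)]]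
          rw [pvALoop_phase2 n off s l (s + l - 1) (i + 1) (by omega)]
          rw [pvFindStop_fuel n off.length off (s + l - 1) (i + 1) (by omega) (by omega)]
          simp
        · rw [if_neg hc, if_neg hc]
          exact ih off s l (i + 1) (by omega)
      · simp [hi]

-- ===== VERDICT (by name: the statement is the Claim_ definition above) =====
theorem resolveTokenIndices_byPosition_spec : Claim_equal_resolveTokenIndices_byPosition := by
  intro off s l _
  unfold Spec_resolveTokenIndices_byPosition
  unfold resolveTokenIndices_byPosition resolveTokenIndices_byPosition_alt
  rw [pvALoop_phase1 off.length off s l 0 (by omega)]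
  cases hfs : pvFindStart off s off.length 0 with
  | none => simp
  | some i0 =>
      have hi0 : i0 < off.length := pvFindStart_lt off.length off s 0 i0 hfs
      have hle : i0 + 1 ≤ pvFindStop off (s + l - 1) off.length (i0 + 1) :=
        le_pvFindStop off.length off (s + l - 1) (i0 + 1) (by omega)
      dsimp only
      rw [PySem.List.pyRange_one]
      have ht : (((pvFindStop off (s + l - 1) off.length (i0 + 1) : Nat) : Int) - (i0 : Int)).toNat =
          pvFindStop off (s + l - 1) off.length (i0 + 1) - i0 := by omega
      rw [ht, map_range_cons i0 (pvFindStop off (s + l - 1) off.length (i0 + 1)) (by omega)]
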